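-- pv_equiv track=rewrite | github.com/ayraton14/YT_DOWNLOADER | yt_downloader_22_fixed_origlang.py | _sanitize_title
-- ===== SOURCE A (Python) =====
-- from typing import List, Optional, Tuple
--
-- def _sanitize_title(title: Optional[str]) -> str:
--     s = (title or "").strip()
--     for ch in '<>:"/\\|?*':
--         s = s.replace(ch, " ")
--     s = s.replace("\n", " ").replace("\r", " ")
--     s = " ".join(s.split())
--     s = s.strip(" .")
--     return s  # длину больше НЕ режем здесь; режем дальше умно
-- ===== SOURCE B (Python) =====
-- from typing import Optional
--
-- def _sanitize_title(title: Optional[str]) -> str: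
--     illegal = set('<>:"/\\|?*')
--     words = []
--     buf = []
--     for ch in (title or ""):
--         if ch in illegal or ch.isspace():
--             if buf:
--                 words.append("".join(buf))
--                 buf = []
--         else:
--             buf.append(ch)
--     if buf:
--         words.append("".join(buf))
--     return " ".join(words).strip(" .")
-- ===== Notes on version B (the rewrite author's own statement) =====
-- stated objective: alternative
-- what changed: Replaces A's eleven replace passes plus split/join with a single character-classification scan that buffers word characters and flushes on any illegal or whitespace character.
import Mathlib
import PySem

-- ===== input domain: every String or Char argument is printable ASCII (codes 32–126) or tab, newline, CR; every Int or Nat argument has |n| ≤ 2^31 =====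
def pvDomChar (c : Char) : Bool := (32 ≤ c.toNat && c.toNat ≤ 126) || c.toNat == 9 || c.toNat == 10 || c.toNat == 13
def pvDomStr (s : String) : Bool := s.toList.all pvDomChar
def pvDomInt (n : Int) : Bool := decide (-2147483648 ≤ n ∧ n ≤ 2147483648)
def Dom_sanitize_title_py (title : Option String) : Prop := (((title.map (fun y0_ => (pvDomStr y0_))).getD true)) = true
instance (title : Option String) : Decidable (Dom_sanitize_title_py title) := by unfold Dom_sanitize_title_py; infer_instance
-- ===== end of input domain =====

-- B replaces A's eleven sequential replace passes plus split/join by a single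
-- character-classification scan (buffer words, flush on illegal/whitespace); same result.

-- ===== PORT A =====
def sanitize_title_py (title : Option String) : String :=
  let s := title.getD ""
  let s := PySem.Str.strip s
  let s := (['<', '>', ':', '"', '/', '\\', '|', '?', '*']).foldl
      (fun s ch => PySem.Str.replace s (String.ofList [ch]) " ") s
  let s := PySem.Str.replace (PySem.Str.replace s "\n" " ") "\r" " "
  let s := PySem.Str.join " " (PySem.Str.split₀ s)
  PySem.Str.stripChars s " ."

-- ===== PORT B =====
def pvIllegal : List Char := ['<', '>', ':', '"', '/', '\\', '|', '?', '*']

def pvIsSep (c : Char) : Bool := pvIllegal.contains c || PySem.Chars.isspace c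

def sanitize_title_py_alt (title : Option String) : String :=
  let st := (title.getD "").toList.foldl
      (fun (st : List String × List Char) c =>
        if pvIsSep c then (if st.2.isEmpty then st else (st.1 ++ [String.ofList st.2], ([] : List Char)))
        else (st.1, st.2 ++ [c]))
      (([] : List String), ([] : List Char))
  let words := if st.2.isEmpty then st.1 else st.1 ++ [String.ofList st.2]
  PySem.Str.stripChars (PySem.Str.join " " words) " ."

-- ===== PRECONDITION & SPEC =====
def Spec_sanitize_title_py (title : Option String) (out : String) : Prop := out = sanitize_title_py_alt title
instance (title : Option String) (out : String) : Decidable (Spec_sanitize_title_py title out) := by unfold Spec_sanitize_title_py; infer_instance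

-- ===== CLAIM (what is proved, stated in full; the proofs are below) =====
def Claim_equal_sanitize_title_py : Prop := ∀ (title : Option String), Dom_sanitize_title_py title → Spec_sanitize_title_py title (sanitize_title_py title)

-- ===== LEMMAS AND PROOFS =====

-- reference word splitter: cur is the pending buffer (in natural order)
def pvWords (p : Char → Bool) : List Char → List Char → List (List Char)
  | [], cur => if cur.isEmpty then [] else [cur]
  | c :: rest, cur =>
      if p c then (if cur.isEmpty then pvWords p rest [] else cur :: pvWords p rest [])
      else pvWords p rest (cur ++ [c])

-- single-char replacement function used by A's replace passes
def pvG (a c : Char) : Char := if c = a then ' ' else c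

-- composition of A's eleven single-char → ' ' replacements, innermost first
def pvF : Char → Char :=
  pvG '\r' ∘ pvG '\n' ∘ pvG '*' ∘ pvG '?' ∘ pvG '|' ∘ pvG '\\' ∘ pvG '/' ∘ pvG '"' ∘ pvG ':' ∘ pvG '>' ∘ pvG '<'

theorem pv_replace_go_single (c : Char) :
    ∀ (l : List Char) (fuel : Nat) (acc : List Char), l.length ≤ fuel →
      PySem.Chars.replace.go [c] [' '] fuel l acc = acc.reverse ++ l.map (pvG c) := by
  intro l
  induction l with
  | nil => intro fuel acc _; cases fuel <;> simp [PySem.Chars.replace.go]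
  | cons d t ih =>
    intro fuel acc h
    cases fuel with
    | zero => simp at h
    | succ fuel =>
      have ht : t.length ≤ fuel := by simp at h; omega
      by_cases hd : d = c
      · subst hd
        have hstep : PySem.Chars.replace.go [d] [' '] (fuel + 1) (d :: t) acc =
            PySem.Chars.replace.go [d] [' '] fuel t (' ' :: acc) := by
          simp [PySem.Chars.replace.go, List.isPrefixOf]
        rw [hstep, ih fuel (' ' :: acc) ht]
        simp [pvG]
      · have hd' : c ≠ d := fun e => hd e.symm
        have hstep : PySem.Chars.replace.go [c] [' '] (fuel + 1) (d :: t) acc =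
            PySem.Chars.replace.go [c] [' '] fuel t (d :: acc) := by
          simp [PySem.Chars.replace.go, List.isPrefixOf, hd']
        rw [hstep, ih fuel (d :: acc) ht]
        simp [pvG, hd]

theorem pv_replace_single (s : List Char) (c : Char) :
    PySem.Chars.replace s [c] [' '] = s.map (pvG c) := by
  have : ([c] : List Char).isEmpty = false := rfl
  simp only [PySem.Chars.replace, this, Bool.false_eq_true, if_false]
  rw [pv_replace_go_single c s s.length [] (le_refl _)]
  simp

theorem pv_split0_go_eq :
    ∀ (s cur : List Char) (acc : List (List Char)),
      PySem.Chars.split₀.go s cur acc = acc.reverse ++ pvWords PySem.Chars.isspace s cur.reverse := by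
  intro s
  induction s with
  | nil =>
    intro cur acc
    by_cases h : cur = [] <;>
      simp [PySem.Chars.split₀.go, pvWords, h, List.isEmpty_iff]
  | cons c rest ih =>
    intro cur acc
    by_cases hc : PySem.Chars.isspace c
    · by_cases h : cur = []
      · subst h
        simp only [PySem.Chars.split₀.go, hc, if_true, List.isEmpty_nil]
        rw [ih [] acc]
        simp [pvWords, hc]
      · have hne : cur.isEmpty = false := by simp [h]
        have hne' : cur.reverse.isEmpty = false := by simp [h]
        simp only [PySem.Chars.split₀.go, hc, if_true, hne, Bool.false_eq_true, if_false]
        rw [ih [] (cur.reverse :: acc)]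
        simp [pvWords, hc, hne']
    · simp only [PySem.Chars.split₀.go, hc, Bool.false_eq_true, if_false]
      rw [ih (c :: cur) acc]
      simp [pvWords, hc]

theorem pv_split0_eq (s : List Char) :
    PySem.Chars.split₀ s = pvWords PySem.Chars.isspace s [] := by
  simpa using pv_split0_go_eq s [] []

theorem pv_fold_inv :
    ∀ (cs : List Char) (ws : List String) (buf : List Char),
      (if (cs.foldl
          (fun (st : List String × List Char) c =>
            if pvIsSep c then (if st.2.isEmpty then st else (st.1 ++ [String.ofList st.2], ([] : List Char)))
            else (st.1, st.2 ++ [c]))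
          (ws, buf)).2.isEmpty then
        (cs.foldl
          (fun (st : List String × List Char) c =>
            if pvIsSep c then (if st.2.isEmpty then st else (st.1 ++ [String.ofList st.2], ([] : List Char)))
            else (st.1, st.2 ++ [c]))
          (ws, buf)).1
      else
        (cs.foldl
          (fun (st : List String × List Char) c =>
            if pvIsSep c then (if st.2.isEmpty then st else (st.1 ++ [String.ofList st.2], ([] : List Char)))
            else (st.1, st.2 ++ [c]))
          (ws, buf)).1 ++ [String.ofList (cs.foldl
          (fun (st : List String × List Char) c =>
            if pvIsSep c then (if st.2.isEmpty then st else (st.1 ++ [String.ofList st.2], ([] : List Char)))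
            else (st.1, st.2 ++ [c]))
          (ws, buf)).2]) =
      ws ++ (pvWords pvIsSep cs buf).map String.ofList := by
  intro cs
  induction cs with
  | nil =>
    intro ws buf
    by_cases h : buf = [] <;> simp [pvWords, h]
  | cons c rest ih =>
    intro ws buf
    simp only [List.foldl_cons]
    by_cases hc : pvIsSep c
    · by_cases h : buf = []
      · subst h
        simpa [pvWords, hc] using ih ws []
      · have hne : buf.isEmpty = false := by simp [h]
        simpa [pvWords, hc, hne] using ih (ws ++ [String.ofList buf]) []
    · have hcf : pvIsSep c = false := by simpa using hc
      simpa [pvWords, hcf] using ih ws (buf ++ [c])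

theorem pv_words_map (p q : Char → Bool) (f : Char → Char)
    (hpq : ∀ c, p (f c) = q c) (hid : ∀ c, q c = false → f c = c) :
    ∀ (cs cur : List Char), pvWords p (cs.map f) cur = pvWords q cs cur := by
  intro cs
  induction cs with
  | nil => intro cur; simp [pvWords]
  | cons c rest ih =>
    intro cur
    simp only [List.map_cons, pvWords, hpq c]
    by_cases hc : q c
    · rw [if_pos hc, if_pos hc, ih]
    · rw [if_neg (by simpa using hc), if_neg (by simpa using hc), hid c (by simpa using hc), ih]

theorem pv_words_all_seps (p : Char → Bool) :
    ∀ (t : List Char), (∀ c ∈ t, p c = true) →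
      ∀ cur : List Char, pvWords p t cur = if cur.isEmpty then [] else [cur] := by
  intro t
  induction t with
  | nil => intro _ cur; rfl
  | cons c t' iht =>
    intro ht cur
    have hc : p c = true := ht c (by simp)
    have iht' := iht (fun d hd => ht d (by simp [hd]))
    by_cases h : cur = []
    · subst h; simp [pvWords, hc, iht']
    · simp [pvWords, hc, h, iht']

theorem pv_words_append_seps (p : Char → Bool) (t : List Char) (ht : ∀ c ∈ t, p c = true) :
    ∀ (s cur : List Char), pvWords p (s ++ t) cur = pvWords p s cur := by
  intro s
  induction s with
  | nil =>
    intro cur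
    simp only [List.nil_append]
    rw [pv_words_all_seps p t ht cur]
    by_cases h : cur = [] <;> simp [pvWords, h]
  | cons c rest ih =>
    intro cur
    by_cases hc : p c
    · by_cases h : cur = []
      · subst h; simp [pvWords, hc, ih]
      · simp [pvWords, hc, h, ih]
    · simp [pvWords, hc, ih]

theorem pv_words_lstrip (p : Char → Bool) (hsp : ∀ c, PySem.Chars.isspace c = true → p c = true) :
    ∀ s : List Char, pvWords p (List.dropWhile PySem.Chars.isspace s) [] = pvWords p s [] := by
  intro s
  induction s with
  | nil => rfl
  | cons c rest ih =>
    by_cases hc : PySem.Chars.isspace c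
    · rw [List.dropWhile_cons_of_pos hc, ih]
      simp [pvWords, hsp c hc]
    · rw [List.dropWhile_cons_of_neg (by simpa using hc)]

theorem pv_words_strip (p : Char → Bool) (hsp : ∀ c, PySem.Chars.isspace c = true → p c = true)
    (s : List Char) : pvWords p (PySem.Chars.strip s) [] = pvWords p s [] := by
  unfold PySem.Chars.strip PySem.Chars.rstrip PySem.Chars.lstrip
  set y := List.dropWhile PySem.Chars.isspace s with hy
  have hsplit : y = (List.dropWhile PySem.Chars.isspace y.reverse).reverse ++
      (List.takeWhile PySem.Chars.isspace y.reverse).reverse := by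
    have h := List.takeWhile_append_dropWhile (p := PySem.Chars.isspace) (l := y.reverse)
    conv_lhs => rw [← List.reverse_reverse y, ← h]
    rw [List.reverse_append]
  have h1 : pvWords p ((List.dropWhile PySem.Chars.isspace y.reverse).reverse) [] = pvWords p y [] := by
    conv_rhs => rw [hsplit]
    rw [pv_words_append_seps p _ (fun c hc => hsp c (List.mem_takeWhile_imp (by simpa using hc)))]
  rw [h1, hy, pv_words_lstrip p hsp]

theorem pvF_eq (c : Char) :
    pvF c = if pvIllegal.contains c || c == '\n' || c == '\r' then ' ' else c := by
  by_cases h : (pvIllegal.contains c || c == '\n' || c == '\r') = true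
  · rw [if_pos h]
    simp only [pvIllegal, List.contains_eq_mem, List.mem_cons, List.not_mem_nil, or_false,
      decide_eq_true_eq, Bool.or_eq_true, beq_iff_eq] at h
    rcases h with ((h | h | h | h | h | h | h | h | h) | h) | h <;> subst h <;> decide
  · rw [if_neg h]
    simp only [pvIllegal, List.contains_eq_mem, List.mem_cons, List.not_mem_nil, or_false,
      decide_eq_true_eq, Bool.or_eq_true, beq_iff_eq, not_or] at h
    obtain ⟨⟨⟨h1, h2, h3, h4, h5, h6, h7, h8, h9⟩, h10⟩, h11⟩ := h
    simp [pvF, pvG, Function.comp_def, h1, h2, h3, h4, h5, h6, h7, h8, h9, h10, h11]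

theorem pv_isspace_pvF (c : Char) : PySem.Chars.isspace (pvF c) = pvIsSep c := by
  rw [pvF_eq]
  by_cases h : (pvIllegal.contains c || c == '\n' || c == '\r') = true
  · rw [if_pos h]
    have hsep : pvIsSep c = true := by
      simp only [Bool.or_eq_true, beq_iff_eq] at h
      rcases h with (h | h) | h
      · simp only [pvIsSep, h, Bool.true_or]
      · subst h; decide
      · subst h; decide
    rw [hsep]; decide
  · rw [if_neg h]
    simp only [Bool.or_eq_true, beq_iff_eq, not_or] at h
    obtain ⟨⟨h1, _⟩, _⟩ := h
    simp only [Bool.not_eq_true] at h1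
    simp only [pvIsSep, h1, Bool.false_or]

theorem pvF_id (c : Char) (h : pvIsSep c = false) : pvF c = c := by
  simp only [pvIsSep, Bool.or_eq_false_iff] at h
  obtain ⟨hcon, hsp⟩ := h
  have h10 : c ≠ '\n' := by rintro rfl; exact absurd hsp (by decide)
  have h11 : c ≠ '\r' := by rintro rfl; exact absurd hsp (by decide)
  have hcond : (pvIllegal.contains c || c == '\n' || c == '\r') = false := by
    simp only [hcon, Bool.false_or, Bool.or_eq_false_iff, beq_eq_false_iff_ne, ne_eq]
    exact ⟨h10, h11⟩
  rw [pvF_eq, hcond]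
  simp

-- ===== VERDICT (by name: the statement is the Claim_ definition above) =====
theorem sanitize_title_py_spec : Claim_equal_sanitize_title_py := by
  intro title _
  unfold Spec_sanitize_title_py sanitize_title_py sanitize_title_py_alt
  dsimp only
  simp only [List.foldl_cons, List.foldl_nil]
  have hinj : Function.Injective String.toList := fun a b h => String.toList_inj.mp h
  have hnl : ("\n" : String).toList = ['\n'] := by decide
  have hcr : ("\r" : String).toList = ['\r'] := by decide
  have hws : (" " : String).toList = [' '] := by decide
  have hsp' : ∀ c : Char, PySem.Chars.isspace c = true → pvIsSep c = true := by
    intro c h; simp [pvIsSep, h]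
  refine congrArg (fun w => PySem.Str.stripChars (PySem.Str.join " " w) " .") ?_
  apply List.map_injective_iff.mpr hinj
  rw [pv_fold_inv]
  rw [PySem.Str.split₀_map_toList]
  simp only [PySem.Str.toList_replace, PySem.Str.toList_strip, hnl, hcr, hws,
    String.toList_ofList, pv_replace_single, List.map_map, List.nil_append]
  rw [pv_split0_eq]
  rw [show (pvG '\x0d' ∘ pvG '\n' ∘ pvG '*' ∘ pvG '?' ∘ pvG '|' ∘ pvG '\\' ∘ pvG '/' ∘
      pvG '\"' ∘ pvG ':' ∘ pvG '>' ∘ pvG '<') = pvF from rfl]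
  rw [pv_words_map PySem.Chars.isspace pvIsSep pvF (fun c => pv_isspace_pvF c) (fun c h => pvF_id c h)]
  rw [pv_words_strip pvIsSep hsp']
  simp [Function.comp_def]
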